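-- pv_equiv track=rewrite | github.com/jussme/advent2021 | 4/adwent4_2.py | checkGrid
-- ===== SOURCE A (Python) =====
-- def checkGrid(grid):
-- 	#check columns
-- 	for col in range(0, len(grid)):
-- 		positiveFound = False
-- 		for row in range(0, len(grid)):
-- 			if(grid[row][col] >= 0):
-- 				positiveFound = True
-- 		if not positiveFound:
-- 			return True
--
-- 	#check rows
-- 	for row in range(0, len(grid)):
-- 		positiveFound = False
-- 		for col in range(0, len(grid)):
-- 			if(grid[row][col] >= 0):
-- 				positiveFound = True
-- 		if not positiveFound:
-- 			return True
-- 	return False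
-- ===== SOURCE B (Python) =====
-- def checkGrid(grid):
--     n = len(grid)
--     rowHasPos = [False] * n
--     colHasPos = [False] * n
--     for r in range(n):
--         for c in range(n):
--             if grid[r][c] >= 0:
--                 rowHasPos[r] = True
--                 colHasPos[c] = True
--     return (not all(rowHasPos)) or (not all(colHasPos))
-- ===== Notes on version B (the rewrite author's own statement) =====
-- stated objective: alternative
-- what changed: Replaces A's two separate nested line-scans (with early return per bad line) by one combined pass that builds rowHasPos/colHasPos boolean tables, followed by a flat all() check over the tables.
-- outside the precondition, e.g. on checkGrid([[-1, -1], [-1]]): A returns True, B raises IndexError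
import Mathlib
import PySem

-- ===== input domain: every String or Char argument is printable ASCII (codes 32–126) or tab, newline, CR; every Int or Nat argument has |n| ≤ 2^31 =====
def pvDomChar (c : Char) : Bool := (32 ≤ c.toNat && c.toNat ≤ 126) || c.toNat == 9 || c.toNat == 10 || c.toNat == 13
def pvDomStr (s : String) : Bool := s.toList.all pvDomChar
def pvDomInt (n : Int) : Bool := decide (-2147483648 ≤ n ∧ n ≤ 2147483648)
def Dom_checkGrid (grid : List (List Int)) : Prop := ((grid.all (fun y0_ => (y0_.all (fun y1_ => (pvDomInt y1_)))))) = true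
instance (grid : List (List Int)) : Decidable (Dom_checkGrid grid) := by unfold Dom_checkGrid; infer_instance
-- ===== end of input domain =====

-- B replaces A's two nested line-scans by one combined pass building per-row/per-column boolean tables; return value only.

-- ===== PORT A =====
-- grid[row][col]: exact for indices in range (guaranteed by Pre_checkGrid); Python raises IndexError out of range
def pvCellA (grid : List (List Int)) (r c : Nat) : Int :=
  (grid.getD r []).getD c (-1)

def pvColLoop (grid : List (List Int)) (cols : List Nat) : Bool :=
  match cols with
  | [] => false
  | c :: rest =>
    let positiveFound :=
      (List.range grid.length).foldl
        (fun pf row => if pvCellA grid row c ≥ 0 then true else pf) false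
    if positiveFound then pvColLoop grid rest else true

def pvRowLoop (grid : List (List Int)) (rows : List Nat) : Bool :=
  match rows with
  | [] => false
  | r :: rest =>
    let positiveFound :=
      (List.range grid.length).foldl
        (fun pf col => if pvCellA grid r col ≥ 0 then true else pf) false
    if positiveFound then pvRowLoop grid rest else true

def checkGrid (grid : List (List Int)) : Bool :=
  if pvColLoop grid (List.range grid.length) then true
  else pvRowLoop grid (List.range grid.length)

-- ===== PORT B =====
def checkGrid_alt (grid : List (List Int)) : Bool :=
  let n := grid.length
  let st :=
    (List.range n).foldl (fun st r =>
      (List.range n).foldl (fun st c =>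
        -- grid[r][c]: exact for indices in range (guaranteed by Pre_checkGrid)
        if (grid.getD r []).getD c (-1) ≥ 0 then (st.1.set r true, st.2.set c true) else st) st)
      (List.replicate n false, List.replicate n false)
  !(st.1.all id) || !(st.2.all id)

-- ===== PRECONDITION & SPEC =====
-- Pre_ excludes ragged grids (some row shorter than len(grid)): there Python A either raises
-- IndexError or returns True by an early return before reaching the short row, while B's single
-- combined pass always touches the short row and raises IndexError.
def Pre_checkGrid (grid : List (List Int)) : Prop :=
  ∀ row ∈ grid, grid.length ≤ row.length
instance (grid : List (List Int)) : Decidable (Pre_checkGrid grid) := by unfold Pre_checkGrid; infer_instance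

def pvWitness_checkGrid : List (List Int) := [[1, -1], [-1, 2]]

def Spec_checkGrid (grid : List (List Int)) (out : Bool) : Prop := out = checkGrid_alt grid
instance (grid : List (List Int)) (out : Bool) : Decidable (Spec_checkGrid grid out) := by unfold Spec_checkGrid; infer_instance

-- ===== CLAIM (what is proved, stated in full; the proofs are below) =====
def Claim_equal_checkGrid : Prop := ∀ (grid : List (List Int)), Dom_checkGrid grid → Pre_checkGrid grid → Spec_checkGrid grid (checkGrid grid)

-- ===== LEMMAS AND PROOFS =====

-- fold of "if P then true" = b || any
theorem pvFoldOr (P : Nat → Prop) [DecidablePred P] :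
    ∀ (l : List Nat) (b : Bool),
      l.foldl (fun pf x => if P x then true else pf) b = (b || l.any fun x => decide (P x)) := by
  intro l
  induction l with
  | nil => simp
  | cons x xs ih =>
    intro b
    simp only [List.foldl, List.any_cons]
    by_cases h : P x
    · rw [if_pos h, ih]; simp [h]
    · rw [if_neg h, ih]; simp [h]

theorem pvColLoop_any (grid : List (List Int)) :
    ∀ (cols : List Nat),
      pvColLoop grid cols
        = cols.any (fun c => !((List.range grid.length).any fun r => decide (pvCellA grid r c ≥ 0))) := by
  intro cols
  induction cols with
  | nil => rfl
  | cons c rest ih =>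
    simp only [pvColLoop, pvFoldOr, Bool.false_or, List.any_cons]
    by_cases h : (List.range grid.length).any (fun r => decide (pvCellA grid r c ≥ 0)) = true <;>
      simp [h, ih]

theorem pvRowLoop_any (grid : List (List Int)) :
    ∀ (rows : List Nat),
      pvRowLoop grid rows
        = rows.any (fun r => !((List.range grid.length).any fun c => decide (pvCellA grid r c ≥ 0))) := by
  intro rows
  induction rows with
  | nil => rfl
  | cons r rest ih =>
    simp only [pvRowLoop, pvFoldOr, Bool.false_or, List.any_cons]
    by_cases h : (List.range grid.length).any (fun c => decide (pvCellA grid r c ≥ 0)) = true <;>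
      simp [h, ih]

-- split the pair-state double fold of B into two independent folds
theorem pvFoldProd {α β γ : Type} (g : γ → α → α) (h : γ → β → β) :
    ∀ (l : List γ) (p : α × β),
      l.foldl (fun st x => (g x st.1, h x st.2)) p
        = (l.foldl (fun a x => g x a) p.1, l.foldl (fun b x => h x b) p.2) := by
  intro l
  induction l with
  | nil => intro p; rfl
  | cons x xs ih => intro p; simp [List.foldl, ih]

-- inner fold at fixed row r only ever sets index r in the first component
theorem pvFoldSetFixed (r : Nat) (P : Nat → Prop) [DecidablePred P] :
    ∀ (cs : List Nat) (a : List Bool),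
      cs.foldl (fun a c => if P c then a.set r true else a) a
        = if cs.any (fun c => decide (P c)) then a.set r true else a := by
  intro cs
  induction cs with
  | nil => simp
  | cons c rest ih =>
    intro a
    by_cases h : P c <;> simp [List.foldl, h, ih, List.set_set]

theorem pvFoldSetSelfLen (f : Nat → Bool) :
    ∀ (rs : List Nat) (a : List Bool),
      (rs.foldl (fun a r => if f r = true then a.set r true else a) a).length = a.length := by
  intro rs
  induction rs with
  | nil => intro a; rfl
  | cons r rest ih =>
    intro a
    simp only [List.foldl]
    rw [ih]
    split <;> simp

theorem pvFoldSetVarLen (P : Nat → Prop) [DecidablePred P] :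
    ∀ (cs : List Nat) (a : List Bool),
      (cs.foldl (fun a c => if P c then a.set c true else a) a).length = a.length := by
  intro cs
  induction cs with
  | nil => intro a; rfl
  | cons c rest ih =>
    intro a
    simp only [List.foldl]
    rw [ih]
    split <;> simp

-- getD after a fold of conditional self-index sets
theorem pvFoldSetSelfGetD (f : Nat → Bool) :
    ∀ (rs : List Nat) (a : List Bool) (i : Nat), i < a.length →
      ((rs.foldl (fun a r => if f r = true then a.set r true else a) a).getD i false)
        = (a.getD i false || (decide (i ∈ rs) && f i)) := by
  intro rs
  induction rs with
  | nil => intro a i hi; simp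
  | cons r rest ih =>
    intro a i hi
    simp only [List.foldl]
    by_cases h : f r = true
    · rw [if_pos h, ih (a.set r true) i (by simpa using hi)]
      by_cases hir : i = r
      · subst hir
        simp [List.getD, hi, h]
      · simp only [List.getD, List.getElem?_set_ne (by omega : r ≠ i), List.mem_cons, hir]
        cases a[i]?.getD false <;> simp
    · rw [if_neg h, ih a i hi]
      by_cases hir : i = r
      · subst hir; simp [List.mem_cons, h]
      · simp [List.mem_cons, hir]

-- getD after the inner fold that sets the visited column index
theorem pvFoldSetVarGetD (P : Nat → Prop) [DecidablePred P] :
    ∀ (cs : List Nat) (a : List Bool) (i : Nat), i < a.length →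
      ((cs.foldl (fun a c => if P c then a.set c true else a) a).getD i false)
        = (a.getD i false || (decide (i ∈ cs) && decide (P i))) := by
  intro cs
  induction cs with
  | nil => intro a i hi; simp
  | cons c rest ih =>
    intro a i hi
    simp only [List.foldl]
    by_cases h : P c
    · rw [if_pos h, ih (a.set c true) i (by simpa using hi)]
      by_cases hic : i = c
      · subst hic
        simp [List.getD, hi, h]
      · simp [List.getD, List.getElem?_set_ne (by omega : c ≠ i), List.mem_cons, hic]
    · rw [if_neg h, ih a i hi]
      by_cases hic : i = c
      · subst hic; simp [List.mem_cons, h]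
      · simp [List.mem_cons, hic]

-- getD after the outer fold of B's second component (column table)
theorem pvOuterVarGetD (P : Nat → Nat → Prop) [∀ r c, Decidable (P r c)] (cs : List Nat) :
    ∀ (rs : List Nat) (a : List Bool) (i : Nat), i < a.length →
      ((rs.foldl (fun a r => cs.foldl (fun a c => if P r c then a.set c true else a) a) a).getD i false)
        = (a.getD i false || rs.any (fun r => decide (i ∈ cs) && decide (P r i))) := by
  intro rs
  induction rs with
  | nil => intro a i hi; simp
  | cons r rest ih =>
    intro a i hi
    simp only [List.foldl, List.any_cons]
    rw [ih _ i (by rw [pvFoldSetVarLen]; exact hi), pvFoldSetVarGetD _ _ _ _ hi]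
    cases a.getD i false <;> simp

theorem pvAllGetD (l : List Bool) (g : Nat → Bool)
    (h : ∀ i, (hi : i < l.length) → l.getD i false = g i) :
    l.all id = (List.range l.length).all g := by
  rw [Bool.eq_iff_iff]
  simp only [List.all_eq_true, List.mem_range, id]
  constructor
  · intro hall i hi
    rw [← h i hi]
    have : l.getD i false = l[i] := by simp [List.getD, List.getElem?_eq_getElem hi]
    rw [this]
    exact hall l[i] (List.getElem_mem hi)
  · intro hall x hx
    obtain ⟨i, hi, rfl⟩ := List.mem_iff_getElem.mp hx
    have : l.getD i false = l[i] := by simp [List.getD, List.getElem?_eq_getElem hi]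
    rw [← this, h i hi]
    exact hall i hi

theorem pvNotAll {α : Type} (l : List α) (p : α → Bool) :
    (!(l.all p)) = l.any (fun x => !(p x)) := by
  induction l with
  | nil => rfl
  | cons x xs ih => cases p x <;> simp [ih]

-- A computes: "some all-negative column" || "some all-negative row"
theorem pvA_char (grid : List (List Int)) :
    checkGrid grid
      = (((List.range grid.length).any fun c => !((List.range grid.length).any fun r => decide (pvCellA grid r c ≥ 0)))
        || ((List.range grid.length).any fun r => !((List.range grid.length).any fun c => decide (pvCellA grid r c ≥ 0)))) := by
  unfold checkGrid
  rw [pvColLoop_any, pvRowLoop_any]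
  cases h : (List.range grid.length).any fun c => !((List.range grid.length).any fun r => decide (pvCellA grid r c ≥ 0)) <;> simp

-- B computes: "some all-negative row" || "some all-negative column"
theorem pvB_char (grid : List (List Int)) :
    checkGrid_alt grid
      = (((List.range grid.length).any fun r => !((List.range grid.length).any fun c => decide (pvCellA grid r c ≥ 0)))
        || ((List.range grid.length).any fun c => !((List.range grid.length).any fun r => decide (pvCellA grid r c ≥ 0)))) := by
  unfold checkGrid_alt
  have hcell : ∀ r c : Nat, ((grid.getD r []).getD c (-1)) = pvCellA grid r c := fun _ _ => rfl
  simp only [hcell]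
  have hstep : ∀ r : Nat, (fun (st : List Bool × List Bool) c => if pvCellA grid r c ≥ 0 then (st.1.set r true, st.2.set c true) else st)
      = fun st c => ((if pvCellA grid r c ≥ 0 then st.1.set r true else st.1),
                     (if pvCellA grid r c ≥ 0 then st.2.set c true else st.2)) := by
    intro r; funext st c; split <;> rfl
  simp only [hstep]
  have hinner : ∀ (r : Nat) (st : List Bool × List Bool),
      (List.range grid.length).foldl (fun st c => ((if pvCellA grid r c ≥ 0 then st.1.set r true else st.1),
                     (if pvCellA grid r c ≥ 0 then st.2.set c true else st.2))) st
      = ((List.range grid.length).foldl (fun a c => if pvCellA grid r c ≥ 0 then a.set r true else a) st.1,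
         (List.range grid.length).foldl (fun b c => if pvCellA grid r c ≥ 0 then b.set c true else b) st.2) := by
    intro r st
    exact pvFoldProd (fun c a => if pvCellA grid r c ≥ 0 then a.set r true else a)
      (fun c b => if pvCellA grid r c ≥ 0 then b.set c true else b) (List.range grid.length) st
  simp only [hinner]
  have houter :
      (List.range grid.length).foldl (fun (st : List Bool × List Bool) r =>
        ((List.range grid.length).foldl (fun a c => if pvCellA grid r c ≥ 0 then a.set r true else a) st.1,
         (List.range grid.length).foldl (fun b c => if pvCellA grid r c ≥ 0 then b.set c true else b) st.2))
        (List.replicate grid.length false, List.replicate grid.length false)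
      = ((List.range grid.length).foldl (fun a r => (List.range grid.length).foldl (fun a c => if pvCellA grid r c ≥ 0 then a.set r true else a) a) (List.replicate grid.length false),
         (List.range grid.length).foldl (fun b r => (List.range grid.length).foldl (fun b c => if pvCellA grid r c ≥ 0 then b.set c true else b) b) (List.replicate grid.length false)) :=
    pvFoldProd (fun r a => (List.range grid.length).foldl (fun a c => if pvCellA grid r c ≥ 0 then a.set r true else a) a)
      (fun r b => (List.range grid.length).foldl (fun b c => if pvCellA grid r c ≥ 0 then b.set c true else b) b)
      (List.range grid.length) (List.replicate grid.length false, List.replicate grid.length false)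
  rw [houter]
  -- first component: reduce the inner fold to a single conditional set, then read off entries
  have hfix : (fun (a : List Bool) (r : Nat) => (List.range grid.length).foldl (fun a c => if pvCellA grid r c ≥ 0 then a.set r true else a) a)
      = fun a r => if ((List.range grid.length).any fun c => decide (pvCellA grid r c ≥ 0)) = true then a.set r true else a := by
    funext a r; exact pvFoldSetFixed r _ _ a
  rw [hfix]
  have hlen1 : ((List.range grid.length).foldl
      (fun a r => if ((List.range grid.length).any fun c => decide (pvCellA grid r c ≥ 0)) = true then a.set r true else a)
      (List.replicate grid.length false)).length = grid.length := by
    rw [pvFoldSetSelfLen]; simp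
  have hlen2 : ((List.range grid.length).foldl
      (fun a r => (List.range grid.length).foldl (fun a c => if pvCellA grid r c ≥ 0 then a.set c true else a) a)
      (List.replicate grid.length false)).length = grid.length := by
    have : ∀ (rs : List Nat) (a : List Bool),
        (rs.foldl (fun a r => (List.range grid.length).foldl (fun a c => if pvCellA grid r c ≥ 0 then a.set c true else a) a) a).length = a.length := by
      intro rs
      induction rs with
      | nil => intro a; rfl
      | cons r rest ih => intro a; simp only [List.foldl]; rw [ih, pvFoldSetVarLen]
    rw [this]; simp
  rw [pvAllGetD _ (fun r => (List.range grid.length).any fun c => decide (pvCellA grid r c ≥ 0)) (by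
    intro i hi
    rw [hlen1] at hi
    rw [pvFoldSetSelfGetD _ _ _ _ (by simpa using hi)]
    simp [List.mem_range, hi]), hlen1]
  rw [pvAllGetD _ (fun c => (List.range grid.length).any fun r => decide (pvCellA grid r c ≥ 0)) (by
    intro i hi
    rw [hlen2] at hi
    rw [pvOuterVarGetD _ _ _ _ _ (by simpa using hi)]
    simp [List.mem_range, hi]), hlen2]
  rw [pvNotAll, pvNotAll]

theorem checkGrid_spec : Claim_equal_checkGrid := by
  intro grid _ _
  unfold Spec_checkGrid
  rw [pvA_char, pvB_char, Bool.or_comm]
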